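-- pv_equiv track=rewrite | github.com/erichamisi/mini-grammarly | app.py | _split_pasted_refs
-- ===== SOURCE A (Python) =====
-- from typing import List, Tuple, Optional
--
-- def _split_pasted_refs(pasted: str) -> List[str]:
--     if not pasted.strip():
--         return []
--     parts, current = [], []
--     for line in pasted.splitlines():
--         if line.strip() == "---":
--             if current:
--                 parts.append("\n".join(current).strip())
--                 current = []
--         else:
--             current.append(line)
--     if current:
--         parts.append("\n".join(current).strip())
--     return [p for p in parts if p]
-- ===== SOURCE B (Python) =====
-- from typing import List
--
--
-- def _split_pasted_refs(pasted: str) -> List[str]: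
--     if not pasted.strip():
--         return []
--
--     def blocks(lines: List[str]) -> List[str]:
--         delims = [i for i, l in enumerate(lines) if l.strip() == "---"]
--         if not delims:
--             b = "\n".join(lines).strip()
--             return [b] if b else []
--         m = delims[len(delims) // 2]
--         return blocks(lines[:m]) + blocks(lines[m + 1:])
--
--     return blocks(pasted.splitlines())
-- ===== Notes on version B (the rewrite author's own statement) =====
-- stated objective: alternative
-- what changed: Replaces A's single stateful pass (mutable parts/current accumulator with per-line flush) by a divide-and-conquer recursion: collect the delimiter positions, split the line list at the middle delimiter, recurse on both halves, and join/strip/filter delimiter-free leaves.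
import Mathlib
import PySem

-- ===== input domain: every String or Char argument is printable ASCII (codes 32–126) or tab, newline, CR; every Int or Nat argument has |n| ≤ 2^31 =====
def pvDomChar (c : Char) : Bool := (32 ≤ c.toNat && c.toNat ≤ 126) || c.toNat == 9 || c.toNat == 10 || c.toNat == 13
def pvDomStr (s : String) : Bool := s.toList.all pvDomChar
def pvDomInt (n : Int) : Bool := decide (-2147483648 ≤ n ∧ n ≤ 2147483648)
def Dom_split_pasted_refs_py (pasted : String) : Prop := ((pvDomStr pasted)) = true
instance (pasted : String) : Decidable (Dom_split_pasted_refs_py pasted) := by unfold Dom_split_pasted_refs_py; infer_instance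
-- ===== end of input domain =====

-- B replaces A's single stateful pass (mutable parts/current with per-line flush) by a
-- divide-and-conquer recursion splitting the line list at its middle delimiter: alternative
-- decomposition, same exact result.


-- ===== PORT A =====
def split_pasted_refs_py (pasted : String) : List String :=
  if PySem.Str.strip pasted = "" then []
  else
    let st :=
      (PySem.Str.splitlines pasted).foldl
        (fun (st : List String × List String) (line : String) =>
          if PySem.Str.strip line = "---" then
            if st.2 ≠ [] then (st.1 ++ [PySem.Str.strip (PySem.Str.join "\n" st.2)], [])
            else st
          else (st.1, st.2 ++ [line]))
        ([], [])
    let parts :=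
      if st.2 ≠ [] then st.1 ++ [PySem.Str.strip (PySem.Str.join "\n" st.2)] else st.1
    parts.filter (fun p => p ≠ "")

-- ===== PORT B =====
-- `blocks`: delimiter positions via enumerate; if none, one join/strip/filter leaf;
-- otherwise split at the middle delimiter and recurse on both halves.
-- (enumerate indices are Ints ≥ 0; `.toNat` is exact here, and lines[:m] / lines[m+1:]
-- with 0 ≤ m < len are exactly take/drop.)
def pvBlocks (lines : List String) : List String :=
  let delims := ((PySem.List.enumerate lines).filter (fun p => PySem.Str.strip p.2 == "---")).map Prod.fst
  match _h : delims[delims.length / 2]? with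
  | none =>
      let b := PySem.Str.strip (PySem.Str.join "\n" lines)
      if b ≠ "" then [b] else []
  | some m =>
      pvBlocks (lines.take m.toNat) ++ pvBlocks (lines.drop (m.toNat + 1))
termination_by lines.length
decreasing_by
  all_goals
    (have hm : m ∈ delims := List.mem_of_getElem? _h
     simp only [delims, List.mem_map, List.mem_filter] at hm
     obtain ⟨p, ⟨hp, _⟩, rfl⟩ := hm
     rw [PySem.List.mem_enumerate_iff] at hp
     obtain ⟨k, hk, rfl⟩ := hp
     simp
     omega)

def split_pasted_refs_py_alt (pasted : String) : List String :=
  if PySem.Str.strip pasted = "" then []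
  else pvBlocks (PySem.Str.splitlines pasted)

-- ===== PRECONDITION & SPEC =====
def Spec_split_pasted_refs_py (pasted : String) (out : List String) : Prop := out = split_pasted_refs_py_alt pasted
instance (pasted : String) (out : List String) : Decidable (Spec_split_pasted_refs_py pasted out) := by unfold Spec_split_pasted_refs_py; infer_instance

-- ===== CLAIM (what is proved, stated in full; the proofs are below) =====
def Claim_equal_split_pasted_refs_py : Prop := ∀ (pasted : String), Dom_split_pasted_refs_py pasted → Spec_split_pasted_refs_py pasted (split_pasted_refs_py pasted)

-- ===== LEMMAS AND PROOFS =====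

-- proof-only intermediate: the maximal runs of non-delimiter lines, in order
def pvRuns (d : String → Bool) : List String → List (List String)
  | [] => []
  | l :: ls =>
    if d l then pvRuns d ls
    else (l :: ls.takeWhile (fun x => !d x)) :: pvRuns d (ls.dropWhile (fun x => !d x))
termination_by ls => ls.length
decreasing_by
  · simp
  · have := List.length_dropWhile_le (p := fun x => !d x) (l := ls); simp; omega

-- runs of a list whose prefix c is all non-delimiter: the first run absorbs c
theorem pvRuns_append_nondelim (d : String → Bool) (c : List String)
    (h : ∀ l ∈ c, d l = false) (rest : List String) :
    pvRuns d (c ++ rest) =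
      (match c with
       | [] => pvRuns d rest
       | a :: c' =>
         (a :: (c' ++ rest.takeWhile (fun x => !d x))) ::
           pvRuns d (rest.dropWhile (fun x => !d x))) := by
  induction c with
  | nil => simp only [List.nil_append]
  | cons a c' ih =>
    have ha : d a = false := h a (List.mem_cons_self)
    have hc' : ∀ l ∈ c', d l = false := fun l hl => h l (List.mem_cons_of_mem _ hl)
    have htakec : c'.takeWhile (fun x => !d x) = c' := by
      rw [List.takeWhile_eq_self_iff]; intro x hx; simp [hc' x hx]
    have htake : (c' ++ rest).takeWhile (fun x => !d x) = c' ++ rest.takeWhile (fun x => !d x) := by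
      rw [List.takeWhile_append, htakec, if_pos rfl]
    have hdrop : (c' ++ rest).dropWhile (fun x => !d x) = rest.dropWhile (fun x => !d x) := by
      have h1 : c'.dropWhile (fun x => !d x) = [] := by
        rw [List.dropWhile_eq_nil_iff]; intro x hx; simp [hc' x hx]
      rw [List.dropWhile_append, h1]; simp
    simp only [List.cons_append, pvRuns, ha, Bool.false_eq_true, if_false, htake, hdrop]

-- splitting at ANY delimiter splits the runs
theorem pvRuns_append_delim_aux (d : String → Bool) (n : Nat) :
    ∀ (xs : List String), xs.length ≤ n → ∀ (y : String) (ys : List String), d y = true →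
      pvRuns d (xs ++ y :: ys) = pvRuns d xs ++ pvRuns d ys := by
  induction n with
  | zero =>
    intro xs hxs y ys hy
    have hnil : xs = [] := by cases xs <;> simp_all
    subst hnil
    simp [pvRuns, hy]
  | succ n ih =>
    intro xs hxs y ys hy
    cases xs with
    | nil => simp [pvRuns, hy]
    | cons x xs' =>
      by_cases hx : d x = true
      · have h1 : pvRuns d (x :: (xs' ++ y :: ys)) = pvRuns d (xs' ++ y :: ys) := by
          simp [pvRuns, hx]
        have h2 : pvRuns d (x :: xs') = pvRuns d xs' := by simp [pvRuns, hx]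
        simp only [List.cons_append, h1, h2]
        exact ih xs' (by simpa using Nat.le_of_succ_le_succ hxs) y ys hy
      · have hx' : d x = false := by simpa using hx
        by_cases hall : ∀ l ∈ xs', d l = false
        · have htw : xs'.takeWhile (fun a => !d a) = xs' := by
            rw [List.takeWhile_eq_self_iff]; intro a ha; simp [hall a ha]
          have hdw : xs'.dropWhile (fun a => !d a) = [] := by
            rw [List.dropWhile_eq_nil_iff]; intro a ha; simp [hall a ha]
          have htwa : (xs' ++ y :: ys).takeWhile (fun a => !d a) = xs' := by
            rw [List.takeWhile_append, htw, if_pos rfl]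
            simp [hy]
          have hdwa : (xs' ++ y :: ys).dropWhile (fun a => !d a) = y :: ys := by
            rw [List.dropWhile_append, hdw]
            simp [hy]
          have hyys : pvRuns d (y :: ys) = pvRuns d ys := by simp [pvRuns, hy]
          simp only [List.cons_append, pvRuns, hx', Bool.false_eq_true, if_false,
            htw, hdw, htwa, hdwa, hyys]
          simp
        · have htwlt : (xs'.takeWhile (fun a => !d a)).length ≠ xs'.length := by
            intro hlen
            have hpre := List.takeWhile_prefix (p := fun a => !d a) (l := xs')
            have := hpre.eq_of_length hlen
            rw [List.takeWhile_eq_self_iff] at this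
            exact hall (fun a ha => by simpa using this a ha)
          have hdwne : xs'.dropWhile (fun a => !d a) ≠ [] := by
            intro hnil
            rw [List.dropWhile_eq_nil_iff] at hnil
            exact hall (fun a ha => by simpa using hnil a ha)
          have htwa : (xs' ++ y :: ys).takeWhile (fun a => !d a)
              = xs'.takeWhile (fun a => !d a) := by
            rw [List.takeWhile_append, if_neg htwlt]
          have hdwa : (xs' ++ y :: ys).dropWhile (fun a => !d a)
              = xs'.dropWhile (fun a => !d a) ++ y :: ys := by
            rw [List.dropWhile_append]
            simp [List.isEmpty_iff, hdwne]
          have hihdw := ih (xs'.dropWhile (fun a => !d a))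
            (le_trans (List.length_dropWhile_le _ _) (by simpa using Nat.le_of_succ_le_succ hxs))
            y ys hy
          simp only [List.cons_append, pvRuns, hx', Bool.false_eq_true, if_false,
            htwa, hdwa, hihdw]

theorem pvRuns_append_delim (d : String → Bool) :
    ∀ (xs : List String) (y : String) (ys : List String), d y = true →
      pvRuns d (xs ++ y :: ys) = pvRuns d xs ++ pvRuns d ys :=
  fun xs => pvRuns_append_delim_aux d xs.length xs le_rfl

-- the flushed A-state equals parts ++ blocks of the remaining runs
theorem foldA_eq_runs (d : String → Bool) (blk : List String → String)
    (lines : List String) :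
    ∀ (parts cur : List String), (∀ l ∈ cur, d l = false) →
      (let st := lines.foldl
          (fun (st : List String × List String) (line : String) =>
            if d line then
              if st.2 ≠ [] then (st.1 ++ [blk st.2], []) else st
            else (st.1, st.2 ++ [line])) (parts, cur)
       if st.2 ≠ [] then st.1 ++ [blk st.2] else st.1)
      = parts ++ (pvRuns d (cur ++ lines)).map blk := by
  induction lines with
  | nil =>
    intro parts cur hcur
    rw [pvRuns_append_nondelim d cur hcur []]
    cases cur with
    | nil => simp [pvRuns]
    | cons a c' => simp [pvRuns]
  | cons l ls ih =>
    intro parts cur hcur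
    simp only [List.foldl_cons]
    by_cases hd : d l = true
    · rw [pvRuns_append_nondelim d cur hcur (l :: ls)]
      simp only [hd, if_true, List.takeWhile_cons, List.dropWhile_cons,
        Bool.not_true]
      cases cur with
      | nil =>
        simpa [pvRuns, hd] using ih parts [] (by simp)
      | cons a c' =>
        have hstep := ih (parts ++ [blk (a :: c')]) [] (by simp)
        simp only [List.nil_append, ne_eq, ite_not] at hstep ⊢
        rw [if_neg (List.cons_ne_nil a c'), hstep]
        simp [hd, pvRuns]
    · have hd' : d l = false := by simpa using hd
      have hcur' : ∀ x ∈ cur ++ [l], d x = false := by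
        intro x hx
        rcases List.mem_append.mp hx with h1 | h1
        · exact hcur x h1
        · simp at h1; subst h1; exact hd'
      have := ih parts (cur ++ [l]) hcur'
      simpa [hd', List.append_assoc] using this

-- B's divide-and-conquer computes exactly the filtered blocks of the runs
theorem pvBlocks_eq_runs_aux (n : Nat) :
    ∀ (lines : List String), lines.length ≤ n →
    pvBlocks lines =
      ((pvRuns (fun l => PySem.Str.strip l == "---") lines).map
        (fun g => PySem.Str.strip (PySem.Str.join "\n" g))).filter (fun p => p ≠ "") := by
  induction n with
  | zero =>
    intro lines hlen
    have : lines = [] := by cases lines <;> simp_all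
    subst this
    rw [pvBlocks.eq_def]
    simp [PySem.List.enumerate_nil, pvRuns]
    decide
  | succ n ih =>
    intro lines hlen
    rw [pvBlocks.eq_def]
    dsimp only
    split
    · -- no delimiter line
      rename_i hnone
      have hnone' :
          (((PySem.List.enumerate lines).filter
            (fun p => PySem.Str.strip p.2 == "---")).map Prod.fst) = [] := by
        by_contra hne
        rcases List.exists_mem_of_ne_nil _ hne with ⟨m, hm⟩
        have hlt : 0 < (((PySem.List.enumerate lines).filter
            (fun p => PySem.Str.strip p.2 == "---")).map Prod.fst).length :=
          List.length_pos_of_mem hm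
        have := List.getElem?_eq_getElem
          (l := ((PySem.List.enumerate lines).filter
            (fun p => PySem.Str.strip p.2 == "---")).map Prod.fst)
          (i := (((PySem.List.enumerate lines).filter
            (fun p => PySem.Str.strip p.2 == "---")).map Prod.fst).length / 2)
          (by omega)
        rw [hnone] at this
        simp at this
      have hall : ∀ l ∈ lines, (PySem.Str.strip l == "---") = false := by
        intro l hl
        by_contra hne
        have hne' : (PySem.Str.strip l == "---") = true := by
          cases hb : (PySem.Str.strip l == "---") <;> simp_all
        obtain ⟨k, hk, hget⟩ := List.mem_iff_getElem.mp hl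
        have hpmem : ((0:Int) + (k:Int), l) ∈ PySem.List.enumerate lines 0 :=
          (PySem.List.mem_enumerate_iff lines 0 _).mpr ⟨k, hk, by rw [hget]⟩
        have : ((0:Int) + (k:Int)) ∈ (((PySem.List.enumerate lines).filter
            (fun p => PySem.Str.strip p.2 == "---")).map Prod.fst) := by
          exact List.mem_map_of_mem (List.mem_filter.mpr ⟨hpmem, hne'⟩)
        rw [hnone'] at this
        exact absurd this (List.not_mem_nil)
      cases lines with
      | nil => simp [pvRuns]; decide
      | cons a c' =>
        have hr : pvRuns (fun l => PySem.Str.strip l == "---") (a :: c') = [a :: c'] := by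
          simpa [pvRuns] using pvRuns_append_nondelim (fun l => PySem.Str.strip l == "---") (a :: c')
            (fun l hl => hall l hl) []
        rw [hr]
        simp only [List.map_cons, List.map_nil, List.filter]
        by_cases hb : PySem.Str.strip (PySem.Str.join "\n" (a :: c')) = "" <;> simp [hb]
    · -- middle delimiter m
      rename_i m hsome
      have hm : m ∈ (((PySem.List.enumerate lines).filter
          (fun p => PySem.Str.strip p.2 == "---")).map Prod.fst) :=
        List.mem_of_getElem? hsome
      rcases List.mem_map.mp hm with ⟨p, hpf, hpm⟩
      rcases List.mem_filter.mp hpf with ⟨hpe, hpd⟩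
      rcases (PySem.List.mem_enumerate_iff lines 0 p).mp hpe with ⟨k, hk, hpk⟩
      subst hpk
      simp only at hpd
      have hmk : m.toNat = k := by simp [← hpm]
      rw [hmk]
      have hsplit : lines = lines.take k ++ lines[k] :: lines.drop (k + 1) := by
        conv_lhs => rw [← List.take_append_drop k lines]
        rw [List.drop_eq_getElem_cons hk]
      conv_rhs => rw [hsplit]
      rw [pvRuns_append_delim (fun l => PySem.Str.strip l == "---") (lines.take k) lines[k]
          (lines.drop (k + 1)) hpd, List.map_append, List.filter_append]
      rw [ih (lines.take k) (by simp; omega), ih (lines.drop (k + 1)) (by simp; omega)]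

theorem pvBlocks_eq_runs (lines : List String) :
    pvBlocks lines =
      ((pvRuns (fun l => PySem.Str.strip l == "---") lines).map
        (fun g => PySem.Str.strip (PySem.Str.join "\n" g))).filter (fun p => p ≠ "") :=
  pvBlocks_eq_runs_aux lines.length lines le_rfl

-- ===== VERDICT (by name: the statement is the Claim_ definition above) =====
theorem split_pasted_refs_py_spec : Claim_equal_split_pasted_refs_py := by
  intro pasted _
  unfold Spec_split_pasted_refs_py split_pasted_refs_py split_pasted_refs_py_alt
  by_cases hs : PySem.Str.strip pasted = ""
  · simp [hs]
  · simp only [hs, if_false]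
    have hfun : (fun (st : List String × List String) (line : String) =>
        if PySem.Str.strip line = "---" then
          if st.2 ≠ [] then (st.1 ++ [PySem.Str.strip (PySem.Str.join "\n" st.2)], [])
          else st
        else (st.1, st.2 ++ [line]))
      = (fun (st : List String × List String) (line : String) =>
        if ((fun l => PySem.Str.strip l == "---") line) = true then
          if st.2 ≠ [] then
            (st.1 ++ [(fun g => PySem.Str.strip (PySem.Str.join "\n" g)) st.2], [])
          else st
        else (st.1, st.2 ++ [line])) := by
      funext st line
      by_cases h : PySem.Str.strip line = "---" <;> simp [h]
    have key := foldA_eq_runs (fun l => PySem.Str.strip l == "---")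
      (fun g => PySem.Str.strip (PySem.Str.join "\n" g))
      (PySem.Str.splitlines pasted) [] [] (by simp)
    simp only [List.nil_append] at key
    rw [hfun, key, pvBlocks_eq_runs]
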